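-- pv_equiv track=rewrite | github.com/bduoto/omtx-hub-online | backend/services/batch_relationship_manager.py | _calculate_batch_status
-- ===== SOURCE A (Python) =====
-- from typing import Dict, Any, List, Optional
--
-- def _calculate_batch_status(batch_index: Dict[str, Any]) -> str:
--     """Calculate overall batch status from individual jobs"""
--
--     individual_jobs = batch_index.get('individual_jobs', [])
--     if not individual_jobs:
--         return 'empty'
--
--     statuses = [job.get('status', 'unknown') for job in individual_jobs]
--
--     if all(s == 'completed' for s in statuses):
--         return 'completed'
--     elif any(s == 'running' for s in statuses):
--         return 'running'
--     elif any(s in ['completed', 'running'] for s in statuses):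
--         return 'partially_completed'
--     else:
--         return 'failed'
-- ===== SOURCE B (Python) =====
-- def _calculate_batch_status(batch_index):
--     """Calculate overall batch status from individual jobs (single counting pass)."""
--     individual_jobs = batch_index.get('individual_jobs', [])
--     if not individual_jobs:
--         return 'empty'
--     total = completed = running = 0
--     for job in individual_jobs:
--         s = job.get('status', 'unknown')
--         total += 1
--         if s == 'completed':
--             completed += 1
--         elif s == 'running':
--             running += 1
--     if completed == total:
--         return 'completed'
--     if running > 0:
--         return 'running'
--     if completed > 0:
--         return 'partially_completed'
--     return 'failed'
-- ===== Notes on version B (the rewrite author's own statement) =====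
-- stated objective: simpler
-- what changed: Replaces the statuses list plus three separate all/any short-circuit scans with one counting pass (total/completed/running) and decides the status from the counts; at the partially_completed branch running is already zero, so completed>0 suffices.
import Mathlib
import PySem

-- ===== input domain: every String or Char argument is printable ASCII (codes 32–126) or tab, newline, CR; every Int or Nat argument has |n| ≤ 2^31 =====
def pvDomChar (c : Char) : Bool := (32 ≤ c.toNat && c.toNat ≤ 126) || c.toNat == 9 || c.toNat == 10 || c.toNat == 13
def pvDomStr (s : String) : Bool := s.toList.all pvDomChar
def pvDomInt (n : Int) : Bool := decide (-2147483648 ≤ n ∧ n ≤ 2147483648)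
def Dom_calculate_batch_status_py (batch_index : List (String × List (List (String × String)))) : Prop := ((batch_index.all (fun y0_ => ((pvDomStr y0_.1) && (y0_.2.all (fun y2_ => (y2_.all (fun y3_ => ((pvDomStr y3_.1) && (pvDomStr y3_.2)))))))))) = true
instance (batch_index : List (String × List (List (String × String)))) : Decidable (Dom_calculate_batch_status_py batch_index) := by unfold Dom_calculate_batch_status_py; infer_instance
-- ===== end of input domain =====

-- B is a single counting pass over the jobs instead of a statuses list with three all/any scans; objective: simpler.

-- shared primitive: Python dict.get(k, dflt) on an association list (first match)
def pvGetAssoc {α : Type} (d : List (String × α)) (k : String) (dflt : α) : α :=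
  match d.find? (fun p => p.1 == k) with
  | some p => p.2
  | none => dflt

-- ===== PORT A =====
def calculate_batch_status_py (batch_index : List (String × List (List (String × String)))) : String :=
  let individual_jobs := pvGetAssoc batch_index "individual_jobs" []
  if individual_jobs.isEmpty then "empty"
  else
    let statuses := individual_jobs.map (fun job => pvGetAssoc job "status" "unknown")
    if statuses.all (fun s => s == "completed") then "completed"
    else if statuses.any (fun s => s == "running") then "running"
    else if statuses.any (fun s => s == "completed" || s == "running") then "partially_completed"
    else "failed"

-- ===== PORT B =====
-- one fold maintaining (total, completed, running) counters
def pvCountStep (acc : Int × Int × Int) (job : List (String × String)) : Int × Int × Int :=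
  let s := pvGetAssoc job "status" "unknown"
  if s == "completed" then (acc.1 + 1, acc.2.1 + 1, acc.2.2)
  else if s == "running" then (acc.1 + 1, acc.2.1, acc.2.2 + 1)
  else (acc.1 + 1, acc.2.1, acc.2.2)

def calculate_batch_status_py_alt (batch_index : List (String × List (List (String × String)))) : String :=
  let individual_jobs := pvGetAssoc batch_index "individual_jobs" []
  if individual_jobs.isEmpty then "empty"
  else
    let c := individual_jobs.foldl pvCountStep (0, 0, 0)
    if c.2.1 = c.1 then "completed"
    else if c.2.2 > 0 then "running"
    else if c.2.1 > 0 then "partially_completed"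
    else "failed"

-- ===== PRECONDITION & SPEC =====
def Spec_calculate_batch_status_py (batch_index : List (String × List (List (String × String)))) (out : String) : Prop := out = calculate_batch_status_py_alt batch_index
instance (batch_index : List (String × List (List (String × String)))) (out : String) : Decidable (Spec_calculate_batch_status_py batch_index out) := by unfold Spec_calculate_batch_status_py; infer_instance

-- ===== CLAIM (what is proved, stated in full; the proofs are below) =====
def Claim_equal_calculate_batch_status_py : Prop := ∀ (batch_index : List (String × List (List (String × String)))), Dom_calculate_batch_status_py batch_index → Spec_calculate_batch_status_py batch_index (calculate_batch_status_py batch_index)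

-- ===== LEMMAS AND PROOFS =====

-- the fold computes length and the two status counts
lemma pvFold_eq (jobs : List (List (String × String))) (t c r : Int) :
    jobs.foldl pvCountStep (t, c, r) =
      (t + jobs.length,
       c + ((jobs.map (fun job => pvGetAssoc job "status" "unknown")).countP (fun s => s == "completed") : Int),
       r + ((jobs.map (fun job => pvGetAssoc job "status" "unknown")).countP (fun s => s == "running") : Int)) := by
  induction jobs generalizing t c r with
  | nil => simp
  | cons hd tl ih =>
    simp only [List.foldl_cons, List.map_cons, List.countP_cons]
    rw [pvCountStep]
    by_cases h1 : pvGetAssoc hd "status" "unknown" = "completed"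
    · simp [h1, ih, Prod.ext_iff]; omega
    · by_cases h2 : pvGetAssoc hd "status" "unknown" = "running"
      · simp [h1, h2, ih, Prod.ext_iff]; omega
      · simp [h1, h2, ih, Prod.ext_iff]; omega
-- ===== VERDICT (by name: the statement is the Claim_ definition above) =====
theorem calculate_batch_status_py_spec : Claim_equal_calculate_batch_status_py := by
  intro bi _
  unfold Spec_calculate_batch_status_py calculate_batch_status_py calculate_batch_status_py_alt
  set jobs := pvGetAssoc bi "individual_jobs" ([] : List (List (String × String))) with hj
  by_cases he : jobs.isEmpty
  · simp [he]
  · simp only [he, Bool.false_eq_true, if_false]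
    rw [pvFold_eq]
    set sts := jobs.map (fun job => pvGetAssoc job "status" "unknown") with hs
    have hlen : sts.length = jobs.length := by simp [hs]
    set cc := sts.countP (fun s => s == "completed") with hcc
    set cr := sts.countP (fun s => s == "running") with hcr
    by_cases hall : sts.all (fun s => s == "completed")
    · have : cc = sts.length := by
        rw [hcc]; exact List.countP_eq_length.mpr (by simpa [List.all_eq_true] using hall)
      simp [hall, this, hlen]
    · have hccn : cc < sts.length :=
        lt_of_le_of_ne List.countP_le_length (by
          intro h; exact hall (by
            simp only [List.all_eq_true]
            exact List.countP_eq_length.mp h))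
      have hccne : ¬ ((0 : Int) + cc = 0 + jobs.length) := by
        rw [← hlen]; omega
      by_cases hrun : sts.any (fun s => s == "running")
      · have hcrp : 0 < cr := by
          rw [hcr]; exact List.countP_pos_iff.mpr (by simpa [List.any_eq_true] using hrun)
        simp only [hall, Bool.false_eq_true, if_false, hrun, if_true]
        rw [if_neg hccne, if_pos (by omega)]
      · have hcr0 : cr = 0 := by
          rw [hcr, List.countP_eq_zero]
          intro s hsmem hc
          simp only [List.any_eq_true, not_exists, not_and] at hrun
          exact hrun s hsmem hc
        have hcrne : ¬ ((0 : Int) + cr > 0) := by rw [hcr0]; norm_num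
        by_cases hpc : sts.any (fun s => s == "completed" || s == "running")
        · have hccp : 0 < cc := by
            rw [hcc]; refine List.countP_pos_iff.mpr ?_
            simp only [List.any_eq_true] at hpc
            obtain ⟨s, hsm, hor⟩ := hpc
            simp only [Bool.or_eq_true] at hor
            rcases hor with h | h
            · exact ⟨s, hsm, h⟩
            · exfalso
              simp only [List.any_eq_true, not_exists, not_and] at hrun
              exact hrun s hsm h
          simp only [hall, Bool.false_eq_true, if_false, hrun, hpc, if_true]
          rw [if_neg hccne, if_neg hcrne, if_pos (by omega)]
        · have hcc0 : cc = 0 := by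
            rw [hcc, List.countP_eq_zero]
            intro s hsmem hc
            simp only [List.any_eq_true, not_exists, not_and] at hpc
            exact hpc s hsmem (by simp [hc])
          simp only [hall, Bool.false_eq_true, if_false, hrun, hpc]
          rw [if_neg hccne, if_neg hcrne, if_neg (by rw [hcc0]; norm_num)]
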